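-- pv_equiv track=rewrite | github.com/LuisAltero/Ano_1_FIAP | Challenge_Safra/Projeto Green Light/Python/Analise_Sentimento_TESTES/Challenge_codigo.py | concat_3
-- ===== SOURCE A (Python) =====
-- def concat_3(texto):
--     palavra_concat = []
--     for p in texto.split():
--         if not palavra_concat:
--             palavra_concat.append(p)
--             temp = p
--         elif len(palavra_concat) == 1:
--             temp_2 = p
--             palavra_concat.append(temp + ' ' + temp_2)
--         else:
--             temp_3 = p
--             palavra_concat.append(temp + ' ' + temp_2 + ' ' + temp_3)
--             temp = temp_2
--             temp_2 = temp_3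
--     del(palavra_concat[0:2])
--     return palavra_concat
-- ===== SOURCE B (Python) =====
-- def concat_3(texto):
--     palavras = texto.split()
--     return [a + ' ' + b + ' ' + c for a, b, c in zip(palavras, palavras[1:], palavras[2:])]
-- ===== Notes on version B (the rewrite author's own statement) =====
-- stated objective: simpler
-- what changed: Replaces A's stateful rolling-window loop (temp/temp_2/temp_3 bookkeeping plus the del[0:2] cleanup of the two partial entries) with a single zip of three offset views of the word list.
import Mathlib
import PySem

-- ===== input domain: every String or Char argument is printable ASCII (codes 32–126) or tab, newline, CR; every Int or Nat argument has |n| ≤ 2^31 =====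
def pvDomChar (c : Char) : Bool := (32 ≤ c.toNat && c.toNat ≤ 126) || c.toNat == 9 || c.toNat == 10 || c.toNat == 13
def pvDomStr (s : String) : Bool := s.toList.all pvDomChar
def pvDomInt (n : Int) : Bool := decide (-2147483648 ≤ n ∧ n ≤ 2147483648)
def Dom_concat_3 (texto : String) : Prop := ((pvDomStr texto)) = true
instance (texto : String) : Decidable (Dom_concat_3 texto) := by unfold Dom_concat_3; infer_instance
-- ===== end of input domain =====

-- B replaces A's stateful rolling window (temp/temp_2/temp_3 and the del[0:2] cleanup)
-- with a zip of three offset views of the word list: same values, simpler decomposition.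

-- ===== PORT A =====
-- one iteration of A's for-loop; state = (palavra_concat, temp, temp_2).
-- temp/temp_2 are unassigned before their branch first sets them; "" stands for that
-- unassigned state and is never read before being assigned (branch order guarantees it).
def concat3Step (st : List String × String × String) (p : String) : List String × String × String :=
  match st with
  | (acc, temp, temp_2) =>
    if acc = [] then (acc ++ [p], p, temp_2)
    else if acc.length = 1 then (acc ++ [temp ++ " " ++ p], temp, p)
    else (acc ++ [temp ++ " " ++ temp_2 ++ " " ++ p], temp_2, p)

def concat_3 (texto : String) : List String :=
  let r := (PySem.Str.split₀ texto).foldl concat3Step ([], "", "")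
  -- del(palavra_concat[0:2]) : removing the first two elements is List.drop 2
  r.1.drop 2

-- ===== PORT B =====
def concat_3_alt (texto : String) : List String :=
  let palavras := PySem.Str.split₀ texto
  (palavras.zip ((PySem.List.slice palavras (some 1) none).zip
                 (PySem.List.slice palavras (some 2) none))).map
    (fun t => t.1 ++ " " ++ t.2.1 ++ " " ++ t.2.2)

-- ===== PRECONDITION & SPEC =====
def Spec_concat_3 (texto : String) (out : List String) : Prop := out = concat_3_alt texto
instance (texto : String) (out : List String) : Decidable (Spec_concat_3 texto out) := by unfold Spec_concat_3; infer_instance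

-- ===== CLAIM (what is proved, stated in full; the proofs are below) =====
def Claim_equal_concat_3 : Prop := ∀ (texto : String), Dom_concat_3 texto → Spec_concat_3 texto (concat_3 texto)

-- ===== LEMMAS AND PROOFS =====

-- once the accumulator has ≥ 2 entries, A's loop appends exactly the joined trigrams
lemma concat3_loop (rest : List String) (acc : List String) (a b : String)
    (h : 2 ≤ acc.length) :
    (rest.foldl concat3Step (acc, a, b)).1 =
      acc ++ ((a :: b :: rest).zip ((b :: rest).zip rest)).map
        (fun t => t.1 ++ " " ++ t.2.1 ++ " " ++ t.2.2) := by
  induction rest generalizing acc a b with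
  | nil => simp
  | cons p rest ih =>
    have hne : acc ≠ [] := by intro hh; simp [hh] at h
    have hl : acc.length ≠ 1 := by omega
    simp only [List.foldl_cons, concat3Step, if_neg hne, if_neg hl]
    rw [ih (acc ++ [a ++ " " ++ b ++ " " ++ p]) b p (by simp; omega)]
    simp [List.zip]

theorem concat_3_spec : Claim_equal_concat_3 := by
  intro texto _
  unfold Spec_concat_3 concat_3 concat_3_alt
  cases hw : PySem.Str.split₀ texto with
  | nil => simp
  | cons w0 ws =>
    cases ws with
    | nil =>
      simp [concat3Step, PySem.List.slice_from_one,
        PySem.List.slice_from ([w0]) (a := 2) (by norm_num)]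
    | cons w1 rest =>
      have h1 : PySem.List.slice (w0 :: w1 :: rest) (some 1) none = w1 :: rest := by
        simpa using PySem.List.slice_from_one (w0 :: w1 :: rest)
      have h2 : PySem.List.slice (w0 :: w1 :: rest) (some 2) none = rest := by
        have := PySem.List.slice_from (w0 :: w1 :: rest) (a := 2) (by norm_num)
        simpa using this
      simp only [h1, h2]
      simp only [List.foldl_cons, concat3Step]
      norm_num
      rw [concat3_loop rest [w0, w0 ++ " " ++ w1] w0 w1 (by simp)]
      simp
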